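-- pv_equiv track=rewrite | github.com/BaruchWolfson144/gmtsar_wrapper | monitor.py | detect_active_stage
-- ===== SOURCE A (Python) =====
-- def detect_active_stage(stages):
--     """Find which stage is currently running (has progress but not complete)."""
--     for stage in stages:
--         if stage is None:
--             continue
--         if stage["done"] < stage["total"] and stage["done"] > 0:
--             return stage
--     # If no stage has partial progress, find the first with 0 done but total > 0
--     for stage in stages:
--         if stage is None:
--             continue
--         if stage["done"] == 0 and stage["total"] > 0:
--             return stage
--     return None
-- ===== SOURCE B (Python) =====
-- def detect_active_stage(stages):
--     """Find which stage is currently running (has progress but not complete)."""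
--     first_pending = None
--     for stage in stages:
--         if stage is None:
--             continue
--         done = stage["done"]
--         total = stage["total"]
--         if 0 < done < total:
--             return stage
--         if done == 0 and total > 0 and first_pending is None:
--             first_pending = stage
--     return first_pending
-- ===== Notes on version B (the rewrite author's own statement) =====
-- stated objective: alternative
-- what changed: Fuses A's two forward scans (first for an in-progress stage, then for a pending one) into a single pass that tracks a first_pending accumulator and returns it only after the loop, preserving the global priority of in-progress over pending.
import Mathlib
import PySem

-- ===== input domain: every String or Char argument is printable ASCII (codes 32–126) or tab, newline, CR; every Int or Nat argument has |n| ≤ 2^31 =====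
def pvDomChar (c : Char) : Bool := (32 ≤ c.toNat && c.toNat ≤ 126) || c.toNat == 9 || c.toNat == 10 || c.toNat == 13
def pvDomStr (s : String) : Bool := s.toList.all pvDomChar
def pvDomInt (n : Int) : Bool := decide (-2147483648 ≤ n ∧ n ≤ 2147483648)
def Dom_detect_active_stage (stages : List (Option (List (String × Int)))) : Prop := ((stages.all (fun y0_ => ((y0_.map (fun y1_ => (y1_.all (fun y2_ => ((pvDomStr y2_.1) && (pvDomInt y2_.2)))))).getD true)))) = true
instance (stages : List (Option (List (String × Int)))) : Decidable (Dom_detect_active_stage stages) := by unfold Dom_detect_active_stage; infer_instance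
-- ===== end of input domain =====

-- B fuses A's two forward scans into one pass with a first_pending accumulator; same O(n) cost, single traversal.

-- ===== PORT A =====
-- d[k] for the stage dicts; KeyError (missing key) is excluded by Pre_, modelled as 0 there
def pyGetItem (d : List (String × Int)) (k : String) : Int :=
  ((d.find? (fun p => p.1 == k)).map Prod.snd).getD 0

-- A's first loop: first non-None stage with done < total and done > 0
def firstInProgress : List (Option (List (String × Int))) → Option (List (String × Int))
  | [] => none
  | none :: rest => firstInProgress rest
  | some d :: rest =>
      if pyGetItem d "done" < pyGetItem d "total" ∧ pyGetItem d "done" > 0 then some d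
      else firstInProgress rest

-- A's second loop: first non-None stage with done == 0 and total > 0
def firstPending : List (Option (List (String × Int))) → Option (List (String × Int))
  | [] => none
  | none :: rest => firstPending rest
  | some d :: rest =>
      if pyGetItem d "done" = 0 ∧ pyGetItem d "total" > 0 then some d
      else firstPending rest

def detect_active_stage (stages : List (Option (List (String × Int)))) : Option (List (String × Int)) :=
  match firstInProgress stages with
  | some s => some s
  | none => firstPending stages

-- ===== PORT B =====
-- single pass carrying the first_pending accumulator
def goB : List (Option (List (String × Int))) → Option (List (String × Int)) → Option (List (String × Int))
  | [], fp => fp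
  | none :: rest, fp => goB rest fp
  | some d :: rest, fp =>
      let done := pyGetItem d "done"
      let total := pyGetItem d "total"
      if 0 < done ∧ done < total then some d
      else goB rest (if done = 0 ∧ total > 0 ∧ fp.isNone then some d else fp)

def detect_active_stage_alt (stages : List (Option (List (String × Int)))) : Option (List (String × Int)) :=
  goB stages none

-- ===== PRECONDITION & SPEC =====
def stageHasKeys (d : List (String × Int)) : Bool :=
  (d.find? (fun p => p.1 == "done")).isSome && (d.find? (fun p => p.1 == "total")).isSome
def stageActive (d : List (String × Int)) : Bool :=
  stageHasKeys d && decide (0 < pyGetItem d "done") && decide (pyGetItem d "done" < pyGetItem d "total")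
-- Pre_ excludes exactly the inputs on which Python A raises KeyError: a non-None stage
-- missing "done" or "total" that is reached before any in-progress stage.
def Pre_detect_active_stage (stages : List (Option (List (String × Int)))) : Prop :=
  (stages.zipIdx.all (fun p =>
    match p.1 with
    | none => true
    | some d => stageHasKeys d ||
        stages.zipIdx.any (fun q => decide (q.2 < p.2) &&
          (match q.1 with | none => false | some e => stageActive e)))) = true
instance (stages : List (Option (List (String × Int)))) : Decidable (Pre_detect_active_stage stages) := by
  unfold Pre_detect_active_stage; infer_instance

def pvWitness_detect_active_stage : (List (Option (List (String × Int)))) :=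
  [none, some [("done", 1), ("total", 3)], some [("done", 0), ("total", 2)]]

def Spec_detect_active_stage (stages : List (Option (List (String × Int)))) (out : Option (List (String × Int))) : Prop := out = detect_active_stage_alt stages
instance (stages : List (Option (List (String × Int)))) (out : Option (List (String × Int))) : Decidable (Spec_detect_active_stage stages out) := by unfold Spec_detect_active_stage; infer_instance

-- ===== CLAIM (what is proved, stated in full; the proofs are below) =====
def Claim_equal_detect_active_stage : Prop := ∀ (stages : List (Option (List (String × Int)))), Dom_detect_active_stage stages → Pre_detect_active_stage stages → Spec_detect_active_stage stages (detect_active_stage stages)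

-- ===== LEMMAS AND PROOFS =====
-- loop invariant: the single pass equals "first in-progress, else carried fp, else first pending"
theorem goB_eq (stages : List (Option (List (String × Int)))) (fp : Option (List (String × Int))) :
    goB stages fp = match firstInProgress stages with
      | some s => some s
      | none => match fp with | some f => some f | none => firstPending stages := by
  induction stages generalizing fp with
  | nil => cases fp <;> rfl
  | cons s rest ih =>
    cases s with
    | none =>
      simp only [goB, firstInProgress, firstPending]
      exact ih fp
    | some d =>
      simp only [goB, firstInProgress, firstPending]
      by_cases h : 0 < pyGetItem d "done" ∧ pyGetItem d "done" < pyGetItem d "total"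
      · rw [if_pos h, if_pos ⟨h.2, h.1⟩]
      · have h' : ¬ (pyGetItem d "done" < pyGetItem d "total" ∧ pyGetItem d "done" > 0) := by
          intro hc; exact h ⟨hc.2, hc.1⟩
        rw [if_neg h, if_neg h']
        rw [ih]
        cases fp with
        | some f => simp
        | none =>
          simp only [Option.isNone_none]
          by_cases hp : pyGetItem d "done" = 0 ∧ pyGetItem d "total" > 0
          · rw [if_pos ⟨hp.1, hp.2, trivial⟩, if_pos hp]
          · have : ¬ (pyGetItem d "done" = 0 ∧ pyGetItem d "total" > 0 ∧ True) := by
              intro hc; exact hp ⟨hc.1, hc.2.1⟩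
            rw [if_neg this, if_neg hp]

-- ===== VERDICT (by name: the statement is the Claim_ definition above) =====
theorem detect_active_stage_spec : Claim_equal_detect_active_stage := by
  intro stages _ _
  unfold Spec_detect_active_stage detect_active_stage detect_active_stage_alt
  rw [goB_eq]
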